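-- pv_equiv track=rewrite | github.com/rpowergso/anagrams | game.py | count_used_pool_letters
-- ===== SOURCE A (Python) =====
-- def count_used_pool_letters(word, source_word, active_tiles):
--     available = [letter.upper() for letter in active_tiles]
--     source_letters = list(source_word.upper()) if source_word else []
--     for letter in word.upper():
--         if letter in source_letters:
--             source_letters.remove(letter)
--         elif letter in available:
--             available.remove(letter)
--         else:
--             return 0
--     return len(active_tiles) - len(available)
-- ===== SOURCE B (Python) =====
-- def count_used_pool_letters(word, source_word, active_tiles):
--     wl = list(word.upper())
--     sl = list(source_word.upper()) if source_word else []
--     pool = [tile.upper() for tile in active_tiles]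
--     total = 0
--     for letter in set(wl):
--         need = wl.count(letter) - sl.count(letter)
--         if need > 0:
--             if need > pool.count(letter):
--                 return 0
--             total += need
--     return total
-- ===== Notes on version B (the rewrite author's own statement) =====
-- stated objective: faster
-- what changed: Replaces A's per-occurrence greedy simulation (membership test plus remove() on mutable source/pool lists for every letter of the word) with per-distinct-letter frequency arithmetic: need = count_in_word - count_in_source, failing if it exceeds the pool count and summing the positive needs.
import Mathlib
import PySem

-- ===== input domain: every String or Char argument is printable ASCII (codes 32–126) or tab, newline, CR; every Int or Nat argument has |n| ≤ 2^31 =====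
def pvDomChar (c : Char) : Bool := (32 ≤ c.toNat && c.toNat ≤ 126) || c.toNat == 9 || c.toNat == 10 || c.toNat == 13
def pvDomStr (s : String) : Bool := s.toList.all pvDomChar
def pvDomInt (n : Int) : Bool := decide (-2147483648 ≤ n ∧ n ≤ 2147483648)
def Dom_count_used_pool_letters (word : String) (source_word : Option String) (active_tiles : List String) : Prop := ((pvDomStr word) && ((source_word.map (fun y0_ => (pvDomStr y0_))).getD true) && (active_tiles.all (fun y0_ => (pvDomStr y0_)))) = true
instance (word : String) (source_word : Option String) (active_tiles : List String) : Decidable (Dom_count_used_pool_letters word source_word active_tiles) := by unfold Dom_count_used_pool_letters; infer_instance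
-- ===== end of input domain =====

-- B replaces A's per-occurrence greedy removal from mutable source/pool lists by per-distinct-letter
-- frequency arithmetic (objective: faster; a timing run measured B faster on the large inputs).

-- 'list(source_word.upper()) if source_word else []' — identical expression in A and B ('if source_word': None and "" are falsy)
def pvSrcLetters (source_word : Option String) : List Char :=
  match source_word with
  | some s => if s = "" then [] else (PySem.Str.upper s).toList
  | none => []

-- ===== PORT A =====
-- the for-loop of A: state = (remaining source letters, remaining available tiles);
-- 'list.remove(x)' after an 'x in list' guard is List.erase (first occurrence, exact);
-- 'return 0' mid-loop = none
def pvLoopA : List Char → List Char → List String → Option (List String)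
  | [], _, avail => some avail
  | c :: rest, src, avail =>
    if c ∈ src then pvLoopA rest (src.erase c) avail
    else if String.ofList [c] ∈ avail then pvLoopA rest src (avail.erase (String.ofList [c]))
    else none

def count_used_pool_letters (word : String) (source_word : Option String) (active_tiles : List String) : Int :=
  match pvLoopA (PySem.Str.upper word).toList (pvSrcLetters source_word) (active_tiles.map PySem.Str.upper) with
  | some avail => (active_tiles.length : Int) - avail.length
  | none => 0

-- ===== PORT B =====
-- the for-loop of B over the distinct letters: need = wl.count - sl.count; fail if need exceeds the pool count
def pvLoopB : List Char → List Char → List Char → List String → Int → Int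
  | [], _, _, _, total => total
  | c :: rest, wl, sl, pool, total =>
    let need : Int := (PySem.List.count wl c : Int) - (PySem.List.count sl c : Int)
    if 0 < need then
      if (PySem.List.count pool (String.ofList [c]) : Int) < need then 0
      else pvLoopB rest wl sl pool (total + need)
    else pvLoopB rest wl sl pool total

def count_used_pool_letters_alt (word : String) (source_word : Option String) (active_tiles : List String) : Int :=
  pvLoopB (PySem.Set.ofList (PySem.Str.upper word).toList) (PySem.Str.upper word).toList
    (pvSrcLetters source_word) (active_tiles.map PySem.Str.upper) 0

-- ===== PRECONDITION & SPEC =====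
def Spec_count_used_pool_letters (word : String) (source_word : Option String) (active_tiles : List String) (out : Int) : Prop := out = count_used_pool_letters_alt word source_word active_tiles
instance (word : String) (source_word : Option String) (active_tiles : List String) (out : Int) : Decidable (Spec_count_used_pool_letters word source_word active_tiles out) := by unfold Spec_count_used_pool_letters; infer_instance

-- ===== CLAIM (what is proved, stated in full; the proofs are below) =====
def Claim_equal_count_used_pool_letters : Prop := ∀ (word : String) (source_word : Option String) (active_tiles : List String), Dom_count_used_pool_letters word source_word active_tiles → Spec_count_used_pool_letters word source_word active_tiles (count_used_pool_letters word source_word active_tiles)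

-- ===== LEMMAS AND PROOFS =====

-- the char carried by a single-character tile
def pvCharOf (t : String) : Option Char :=
  match t.toList with
  | [c] => some c
  | _ => none

-- multiset of chars of the single-character tiles of the pool
def pvP (avail : List String) : Multiset Char := ↑(avail.filterMap pvCharOf)

lemma pvCharOf_single (c : Char) : pvCharOf (String.ofList [c]) = some c := by
  unfold pvCharOf; simp

lemma pvCharOf_eq_some_iff (t : String) (c : Char) : pvCharOf t = some c ↔ t = String.ofList [c] := by
  constructor
  · intro h
    unfold pvCharOf at h
    apply String.toList_inj.mp
    rcases ht : t.toList with _ | ⟨a, _ | ⟨b, l⟩⟩ <;> simp_all [ht]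
  · rintro rfl; exact pvCharOf_single c

lemma pvP_count (avail : List String) (c : Char) :
    Multiset.count c (pvP avail) = avail.count (String.ofList [c]) := by
  induction avail with
  | nil => rfl
  | cons t l ih =>
    unfold pvP at *
    simp only [Multiset.coe_count] at ih ⊢
    rcases hf : pvCharOf t with _ | d
    · have hne : t ≠ String.ofList [c] := by
        intro he; rw [(pvCharOf_eq_some_iff t c).mpr he] at hf; cases hf
      simp [hf, ih, hne]
    · have ht : t = String.ofList [d] := (pvCharOf_eq_some_iff t d).mp hf
      subst ht
      by_cases hdc : d = c
      · subst hdc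
        simp [pvCharOf_single, ih]
      · have hne : String.ofList [d] ≠ String.ofList [c] := by
          intro he
          exact hdc (by simpa using congrArg String.toList he)
        simp [pvCharOf_single, ih, hne, hdc]

lemma pvP_erase (avail : List String) (c : Char) (h : String.ofList [c] ∈ avail) :
    pvP avail = c ::ₘ pvP (avail.erase (String.ofList [c])) := by
  induction avail with
  | nil => cases h
  | cons t l ih =>
    by_cases he : t = String.ofList [c]
    · subst he
      unfold pvP
      simp [pvCharOf_single]
    · have hml : String.ofList [c] ∈ l := by
        rcases List.mem_cons.mp h with h' | h'
        · exact absurd h'.symm he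
        · exact h'
      have hrec := ih hml
      unfold pvP at *
      rw [List.erase_cons_tail (by simp [he])]
      rcases hf : pvCharOf t with _ | d
      · simpa [hf] using hrec
      · simp only [List.filterMap_cons, hf]
        rw [show ((d :: (l.filterMap pvCharOf) : List Char) : Multiset Char) = d ::ₘ ↑(l.filterMap pvCharOf) from rfl]
        rw [show ((d :: ((l.erase (String.ofList [c])).filterMap pvCharOf) : List Char) : Multiset Char) = d ::ₘ ↑((l.erase (String.ofList [c])).filterMap pvCharOf) from rfl]
        rw [hrec, Multiset.cons_swap]

-- A's loop, characterised: it succeeds iff the truncated difference word − source fits in the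
-- single-char-tile pool, and then the number of removed tiles is the cardinality of that difference.
lemma pvLoopA_spec : ∀ (ws src : List Char) (avail : List String),
    if ((ws : Multiset Char) - (src : Multiset Char)) ≤ pvP avail
    then ∃ a', pvLoopA ws src avail = some a' ∧
        (avail.length : Int) - a'.length =
          (Multiset.card ((ws : Multiset Char) - (src : Multiset Char)) : Int)
    else pvLoopA ws src avail = none := by
  intro ws
  induction ws with
  | nil => intro src avail; simp [pvLoopA]
  | cons c rest ih =>
    intro src avail
    by_cases hs : c ∈ src
    · have key : ((c :: rest : List Char) : Multiset Char) - (src : Multiset Char)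
          = ((rest : Multiset Char) - ((src.erase c : List Char) : Multiset Char)) := by
        have hsc : (src : Multiset Char) = c ::ₘ ↑(src.erase c) := by
          rw [← Multiset.coe_erase]
          exact (Multiset.cons_erase (by exact_mod_cast hs)).symm
        rw [show (((c :: rest : List Char)) : Multiset Char) = c ::ₘ ↑rest from rfl, hsc,
          Multiset.sub_cons, Multiset.erase_cons_head]
      simp only [pvLoopA, if_pos hs, key]
      exact ih (src.erase c) avail
    · have hcount : Multiset.count c (((c :: rest : List Char) : Multiset Char) - ↑src)
          = rest.count c + 1 := by
        rw [Multiset.count_sub]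
        simp [Multiset.coe_count, List.count_eq_zero_of_not_mem hs]
      have key : (((c :: rest : List Char)) : Multiset Char) - (src : Multiset Char)
          = c ::ₘ ((rest : Multiset Char) - (src : Multiset Char)) := by
        ext a
        by_cases ha : a = c
        · subst ha
          rw [hcount, Multiset.count_cons_self, Multiset.count_sub]
          simp [Multiset.coe_count, List.count_eq_zero_of_not_mem hs]
        · rw [Multiset.count_cons_of_ne ha, Multiset.count_sub, Multiset.count_sub]
          simp only [Multiset.coe_count, List.count_cons]
          have : ¬ (c = a) := fun h => ha h.symm
          simp [this]
      by_cases hp : String.ofList [c] ∈ avail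
      · have hper := pvP_erase avail c hp
        have ihh := ih src (avail.erase (String.ofList [c]))
        have hlen : (avail.erase (String.ofList [c])).length + 1 = avail.length := by
          rw [List.length_erase_of_mem hp]
          exact Nat.succ_pred_eq_of_pos (List.length_pos_of_mem hp)
        simp only [pvLoopA, if_neg hs, if_pos hp]
        have hiff : ((((c :: rest : List Char)) : Multiset Char) - ↑src ≤ pvP avail)
            ↔ (((rest : Multiset Char) - ↑src) ≤ pvP (avail.erase (String.ofList [c]))) := by
          rw [key, hper, Multiset.cons_le_cons_iff]
        by_cases hle : ((rest : Multiset Char) - ↑src) ≤ pvP (avail.erase (String.ofList [c]))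
        · rw [if_pos (hiff.mpr hle)]
          rw [if_pos hle] at ihh
          obtain ⟨a', ha', hl⟩ := ihh
          refine ⟨a', ha', ?_⟩
          rw [key, Multiset.card_cons]
          push_cast
          omega
        · rw [if_neg (fun h => hle (hiff.mp h))]
          rw [if_neg hle] at ihh
          exact ihh
      · have hnle : ¬ ((((c :: rest : List Char)) : Multiset Char) - ↑src ≤ pvP avail) := by
          intro hle
          have := Multiset.count_le_of_le c hle
          rw [hcount, pvP_count] at this
          rw [List.count_eq_zero_of_not_mem hp] at this
          omega
        simp only [pvLoopA, if_neg hs, if_neg hp, if_neg hnle]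

-- B's loop, characterised over any letter list ds
lemma pvLoopB_spec : ∀ (ds wl sl : List Char) (pool : List String) (t : Int),
    pvLoopB ds wl sl pool t =
      if ∀ c ∈ ds, (wl.count c : Int) - sl.count c ≤ pool.count (String.ofList [c])
      then t + (ds.map (fun c => max ((wl.count c : Int) - sl.count c) 0)).sum
      else 0 := by
  intro ds
  induction ds with
  | nil => intro wl sl pool t; simp [pvLoopB]
  | cons c rest ih =>
    intro wl sl pool t
    have hcnt : ∀ (l : List Char) (a : Char), PySem.List.count l a = l.count a :=
      fun l a => PySem.List.count_eq l a
    have hcnt' : PySem.List.count pool (String.ofList [c]) = pool.count (String.ofList [c]) :=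
      PySem.List.count_eq pool (String.ofList [c])
    simp only [pvLoopB, hcnt, hcnt', ih]
    by_cases h1 : (0 : Int) < (wl.count c : Int) - sl.count c
    · rw [if_pos h1]
      by_cases h2 : (pool.count (String.ofList [c]) : Int) < (wl.count c : Int) - sl.count c
      · rw [if_pos h2, if_neg (fun hall => absurd (hall c List.mem_cons_self) (by omega))]
      · rw [if_neg h2]
        by_cases h3 : ∀ a ∈ rest, (wl.count a : Int) - sl.count a ≤ pool.count (String.ofList [a])
        · rw [if_pos h3, if_pos]
          · simp only [List.map_cons, List.sum_cons]
            rw [max_eq_left (le_of_lt h1)]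
            ring
          · intro a ha
            rcases List.mem_cons.mp ha with rfl | ha'
            · omega
            · exact h3 a ha'
        · rw [if_neg h3, if_neg (fun hall => h3 (fun a ha => hall a (List.mem_cons_of_mem c ha)))]
    · rw [if_neg h1]
      by_cases h3 : ∀ a ∈ rest, (wl.count a : Int) - sl.count a ≤ pool.count (String.ofList [a])
      · rw [if_pos h3, if_pos]
        · simp only [List.map_cons, List.sum_cons]
          rw [max_eq_right (by omega)]
          ring
        · intro a ha
          rcases List.mem_cons.mp ha with rfl | ha'
          · have : (0 : Int) ≤ pool.count (String.ofList [a]) := by positivity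
            omega
          · exact h3 a ha'
      · rw [if_neg h3, if_neg (fun hall => h3 (fun a ha => hall a (List.mem_cons_of_mem c ha)))]

-- the two characterisations agree: condition …
lemma pv_cond_iff (wl sl : List Char) (pool : List String) :
    (∀ c ∈ PySem.Set.ofList wl, (wl.count c : Int) - sl.count c ≤ pool.count (String.ofList [c]))
      ↔ ((wl : Multiset Char) - (sl : Multiset Char)) ≤ pvP pool := by
  constructor
  · intro h
    rw [Multiset.le_iff_count]
    intro a
    rw [Multiset.count_sub, pvP_count]
    simp only [Multiset.coe_count]
    by_cases ha : a ∈ wl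
    · have := h a ((PySem.Set.mem_ofList wl a).mpr ha)
      omega
    · simp [List.count_eq_zero_of_not_mem ha]
  · intro h c hc
    have := Multiset.count_le_of_le c h
    rw [Multiset.count_sub, pvP_count] at this
    simp only [Multiset.coe_count] at this
    omega

-- … and sum
lemma pv_sum_eq (wl sl : List Char) :
    ((PySem.Set.ofList wl).map (fun c => max ((wl.count c : Int) - sl.count c) 0)).sum
      = (Multiset.card ((wl : Multiset Char) - (sl : Multiset Char)) : Int) := by
  set D : Multiset Char := (wl : Multiset Char) - (sl : Multiset Char) with hD
  have hnd : (PySem.Set.ofList wl).Nodup := PySem.Set.nodup_ofList wl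
  have hpt : ∀ c, max ((wl.count c : Int) - sl.count c) 0 = (D.count c : Int) := by
    intro c
    rw [hD, Multiset.count_sub]
    simp only [Multiset.coe_count]
    omega
  have hnat : ∑ c ∈ (PySem.Set.ofList wl).toFinset, D.count c = Multiset.card D := by
    rw [← Multiset.toFinset_sum_count_eq D]
    refine (Finset.sum_subset ?_ ?_).symm
    · intro a ha
      rw [Multiset.mem_toFinset] at ha
      have hpos := Multiset.count_pos.mpr ha
      rw [hD, Multiset.count_sub] at hpos
      simp only [Multiset.coe_count] at hpos
      have haw : a ∈ wl := by
        by_contra hna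
        rw [List.count_eq_zero_of_not_mem hna] at hpos
        omega
      rw [List.mem_toFinset]
      exact (PySem.Set.mem_ofList wl a).mpr haw
    · intro a _ ha
      rw [Multiset.mem_toFinset] at ha
      rw [Multiset.count_eq_zero.mpr ha]
  calc ((PySem.Set.ofList wl).map (fun c => max ((wl.count c : Int) - sl.count c) 0)).sum
      = ∑ c ∈ (PySem.Set.ofList wl).toFinset, (max ((wl.count c : Int) - sl.count c) 0) :=
        (List.sum_toFinset _ hnd).symm
    _ = ∑ c ∈ (PySem.Set.ofList wl).toFinset, (D.count c : Int) := by
        exact Finset.sum_congr rfl (fun c _ => hpt c)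
    _ = (Multiset.card D : Int) := by
        rw [← hnat]; push_cast; rfl

-- ===== VERDICT (by name: the statement is the Claim_ definition above) =====
theorem count_used_pool_letters_spec : Claim_equal_count_used_pool_letters := by
  intro word source_word active_tiles _
  unfold Spec_count_used_pool_letters count_used_pool_letters count_used_pool_letters_alt
  have hA := pvLoopA_spec (PySem.Str.upper word).toList (pvSrcLetters source_word)
    (active_tiles.map PySem.Str.upper)
  have hB := pvLoopB_spec (PySem.Set.ofList (PySem.Str.upper word).toList)
    (PySem.Str.upper word).toList (pvSrcLetters source_word) (active_tiles.map PySem.Str.upper) 0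
  have hlenpool : (active_tiles.map PySem.Str.upper).length = active_tiles.length :=
    List.length_map ..
  by_cases hle : (((PySem.Str.upper word).toList : Multiset Char)
      - ((pvSrcLetters source_word : List Char) : Multiset Char))
      ≤ pvP (active_tiles.map PySem.Str.upper)
  · rw [if_pos hle] at hA
    obtain ⟨a', ha', hl⟩ := hA
    rw [ha']
    rw [if_pos ((pv_cond_iff _ _ _).mpr hle), pv_sum_eq] at hB
    rw [hB, zero_add, ← hl, hlenpool]
  · rw [if_neg hle] at hA
    rw [hA]
    rw [if_neg (fun h => hle ((pv_cond_iff _ _ _).mp h))] at hB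
    rw [hB]
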